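-- pv_equiv track=rewrite | github.com/bornkesselpascal/university | python/gdp-python/Übungen/Blatt 8/b.py | ordne_nach_alter
-- ===== SOURCE A (Python) =====
-- def ordne_nach_alter(liste):
--     vj = []
--     mj = []
--
--     for person in liste:
--         if person[1] > 18:
--             vj.append(person)
--         else:
--             mj.append(person)
--
--     nach_alter = lambda person:person[1]
--     sortiert_vj = sorted(vj, key= nach_alter)
--     sortiert_mj = sorted(mj, key= nach_alter)
--
--     return sortiert_vj, sortiert_mj
-- ===== SOURCE B (Python) =====
-- def ordne_nach_alter(liste):
--     nach_alter = sorted(liste, key=lambda person: person[1])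
--     vj = [person for person in nach_alter if person[1] > 18]
--     mj = [person for person in nach_alter if person[1] <= 18]
--     return vj, mj
-- ===== Notes on version B (the rewrite author's own statement) =====
-- stated objective: simpler
-- what changed: B sorts the whole list once by age (stable sort) and then extracts each group with a filter comprehension, instead of partitioning with an append loop and sorting each group separately; stability makes the results identical.
import Mathlib
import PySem

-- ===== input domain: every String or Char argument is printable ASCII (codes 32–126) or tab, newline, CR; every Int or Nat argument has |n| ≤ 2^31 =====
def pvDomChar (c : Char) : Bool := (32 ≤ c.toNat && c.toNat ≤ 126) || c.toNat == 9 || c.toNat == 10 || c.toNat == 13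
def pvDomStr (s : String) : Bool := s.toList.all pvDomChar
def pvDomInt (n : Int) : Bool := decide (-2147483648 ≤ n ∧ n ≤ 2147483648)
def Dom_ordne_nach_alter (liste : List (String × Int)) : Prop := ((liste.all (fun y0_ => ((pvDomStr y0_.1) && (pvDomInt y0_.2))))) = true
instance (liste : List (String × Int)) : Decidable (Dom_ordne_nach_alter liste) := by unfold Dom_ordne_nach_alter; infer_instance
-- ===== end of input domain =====

-- B sorts the whole list once (stable) and extracts each group by a filter, instead of partitioning with a loop and sorting each group: simpler, one sort instead of two.


-- ===== PORT A =====
-- partition first (two append-accumulators, as in the Python loop), then sort each group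
def ordne_nach_alter (liste : List (String × Int)) : (List (String × Int)) × (List (String × Int)) :=
  let acc := liste.foldl
    (fun (acc : List (String × Int) × List (String × Int)) person =>
      if person.2 > 18 then (acc.1 ++ [person], acc.2) else (acc.1, acc.2 ++ [person]))
    ([], [])
  (PySem.List.sorted acc.1 (fun person => person.2) false,
   PySem.List.sorted acc.2 (fun person => person.2) false)

-- ===== PORT B =====
-- sort the whole list once (stable), then two filter comprehensions over the sorted list
def ordne_nach_alter_alt (liste : List (String × Int)) : (List (String × Int)) × (List (String × Int)) :=
  let nach_alter := PySem.List.sorted liste (fun person => person.2) false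
  (nach_alter.filter (fun person => person.2 > 18),
   nach_alter.filter (fun person => person.2 ≤ 18))

-- ===== PRECONDITION & SPEC =====
def Spec_ordne_nach_alter (liste : List (String × Int)) (out : (List (String × Int)) × (List (String × Int))) : Prop := out = ordne_nach_alter_alt liste
instance (liste : List (String × Int)) (out : (List (String × Int)) × (List (String × Int))) : Decidable (Spec_ordne_nach_alter liste out) := by unfold Spec_ordne_nach_alter; infer_instance

-- ===== CLAIM (what is proved, stated in full; the proofs are below) =====
def Claim_equal_ordne_nach_alter : Prop := ∀ (liste : List (String × Int)), Dom_ordne_nach_alter liste → Spec_ordne_nach_alter liste (ordne_nach_alter liste)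

-- ===== LEMMAS AND PROOFS =====

-- A's pair-accumulator loop is (filter p, filter ¬p) appended to the accumulator
theorem partFold_eq {α : Type} (p : α → Prop) [DecidablePred p] (l : List α) (a b : List α) :
    l.foldl (fun (acc : List α × List α) x =>
      if p x then (acc.1 ++ [x], acc.2) else (acc.1, acc.2 ++ [x])) (a, b)
    = (a ++ l.filter (fun x => decide (p x)), b ++ l.filter (fun x => !decide (p x))) := by
  induction l generalizing a b with
  | nil => simp
  | cons x t ih =>
    by_cases hx : p x <;> simp [hx, ih]

-- insertBy puts x at the head when its key is strictly below every element's key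
theorem insertBy_head {α : Type} (key : α → Int) (x : α) (l : List α)
    (h : ∀ z ∈ l, key x < key z) :
    PySem.List.insertBy (fun a b => decide (key a < key b)) x l = x :: l := by
  cases l with
  | nil => rfl
  | cons y t =>
    have : key x < key y := h y (by simp)
    simp [PySem.List.insertBy, this]

-- filtering commutes with a single insertion into a key-sorted list
theorem filter_insertBy {α : Type} (key : α → Int) (p : α → Bool) (x : α) (ys : List α)
    (hs : ys.Pairwise (fun a b => key a ≤ key b)) :
    (PySem.List.insertBy (fun a b => decide (key a < key b)) x ys).filter p
    = if p x then PySem.List.insertBy (fun a b => decide (key a < key b)) x (ys.filter p)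
      else ys.filter p := by
  induction ys with
  | nil =>
    by_cases hx : p x <;> simp [PySem.List.insertBy, hx]
  | cons y t ih =>
    rcases List.pairwise_cons.mp hs with ⟨hy, ht⟩
    by_cases hb : key x < key y
    · have hall : ∀ z ∈ (y :: t).filter p, key x < key z := by
        intro z hz
        have hz' : z ∈ y :: t := List.mem_of_mem_filter hz
        rcases List.mem_cons.mp hz' with h | h
        · simpa [h] using hb
        · exact lt_of_lt_of_le hb (hy z h)
      by_cases hx : p x
      · rw [insertBy_head key x ((y :: t).filter p) hall]
        simp [PySem.List.insertBy, hb, hx, List.filter_cons]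
      · simp [PySem.List.insertBy, hb, hx, List.filter_cons]
    · have step : PySem.List.insertBy (fun a b => decide (key a < key b)) x (y :: t)
          = y :: PySem.List.insertBy (fun a b => decide (key a < key b)) x t := by
        simp [PySem.List.insertBy, hb]
      rw [step]
      by_cases hy' : p y
      · by_cases hx : p x
        · have step2 : PySem.List.insertBy (fun a b => decide (key a < key b)) x ((y :: t).filter p)
              = y :: PySem.List.insertBy (fun a b => decide (key a < key b)) x (t.filter p) := by
            simp [hy', PySem.List.insertBy, hb]
          simp [hy', hx, ih ht, PySem.List.insertBy, hb]
        · simp [hy', hx, ih ht]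
      · simp [hy', ih ht]

-- sorted of a snoc is one insertion into sorted of the prefix (unfold of the fold)
theorem sorted_snoc {α : Type} (key : α → Int) (t : List α) (x : α) :
    PySem.List.sorted (t ++ [x]) key false
    = PySem.List.insertBy (fun a b => decide (key a < key b)) x (PySem.List.sorted t key false) := by
  rw [PySem.List.sorted_eq_foldl_insertBy, List.foldl_append,
    ← PySem.List.sorted_eq_foldl_insertBy]
  rfl

-- filtering commutes with the stable sort
theorem filter_sorted {α : Type} (key : α → Int) (p : α → Bool) (xs : List α) :
    (PySem.List.sorted xs key false).filter p
    = PySem.List.sorted (xs.filter p) key false := by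
  induction xs using List.reverseRecOn with
  | nil => rfl
  | append_singleton t x ih =>
    rw [sorted_snoc, filter_insertBy key p x _ (PySem.List.sorted_pairwise t key), ih,
      List.filter_append, List.filter_cons]
    by_cases hx : p x
    · simp [hx, sorted_snoc]
    · simp [hx]

-- ===== VERDICT (by name: the statement is the Claim_ definition above) =====
theorem ordne_nach_alter_spec : Claim_equal_ordne_nach_alter := by
  intro liste _
  unfold Spec_ordne_nach_alter ordne_nach_alter ordne_nach_alter_alt
  rw [partFold_eq (fun (person : String × Int) => person.2 > 18) liste]
  simp only [List.nil_append]
  rw [← filter_sorted (fun person => person.2) (fun person => decide (person.2 > 18)) liste,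
    ← filter_sorted (fun person => person.2) (fun person => !decide (person.2 > 18)) liste]
  have : (fun (person : String × Int) => !decide (person.2 > 18))
       = (fun (person : String × Int) => decide (person.2 ≤ 18)) := by
    funext person; by_cases h : person.2 ≤ 18 <;> simp [h] <;> omega
  rw [this]
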